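-- pv_equiv track=rewrite | github.com/Lanerra/DWARF | autoresearch/loop_35m.py | _classify_config
-- ===== SOURCE A (Python) =====
-- def _classify_config(sparse_list):
--     """Classify a sparse config into analysis classes."""
--     classes = []
--     if all(x <= 200 for x in sparse_list):
--         classes.append('sparse_all_leq_200')
--     if any(x >= 384 for x in sparse_list):
--         classes.append('sparse_includes_384')
--     if any(x >= 768 for x in sparse_list):
--         classes.append('sparse_includes_768_plus')
--     if len(sparse_list) <= 3:
--         classes.append('sparse_3_or_fewer')
--     if len(sparse_list) >= 5:
--         classes.append('sparse_5_or_more')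
--     return classes
-- ===== SOURCE B (Python) =====
-- def _classify_config(sparse_list):
--     """Classify a sparse config into analysis classes (single-pass flag version)."""
--     all_leq_200 = True
--     any_384 = False
--     any_768 = False
--     n = 0
--     for x in sparse_list:
--         all_leq_200 = all_leq_200 and x <= 200
--         any_384 = any_384 or x >= 384
--         any_768 = any_768 or x >= 768
--         n += 1
--     classes = []
--     if all_leq_200:
--         classes.append('sparse_all_leq_200')
--     if any_384:
--         classes.append('sparse_includes_384')
--     if any_768:
--         classes.append('sparse_includes_768_plus')
--     if n <= 3:
--         classes.append('sparse_3_or_fewer')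
--     if n >= 5:
--         classes.append('sparse_5_or_more')
--     return classes
-- ===== Notes on version B (the rewrite author's own statement) =====
-- stated objective: alternative
-- what changed: Replaces A's three separate all/any scans over the list with a single loop maintaining three boolean flags and a counter, then emits the labels from the flags.
import Mathlib
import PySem

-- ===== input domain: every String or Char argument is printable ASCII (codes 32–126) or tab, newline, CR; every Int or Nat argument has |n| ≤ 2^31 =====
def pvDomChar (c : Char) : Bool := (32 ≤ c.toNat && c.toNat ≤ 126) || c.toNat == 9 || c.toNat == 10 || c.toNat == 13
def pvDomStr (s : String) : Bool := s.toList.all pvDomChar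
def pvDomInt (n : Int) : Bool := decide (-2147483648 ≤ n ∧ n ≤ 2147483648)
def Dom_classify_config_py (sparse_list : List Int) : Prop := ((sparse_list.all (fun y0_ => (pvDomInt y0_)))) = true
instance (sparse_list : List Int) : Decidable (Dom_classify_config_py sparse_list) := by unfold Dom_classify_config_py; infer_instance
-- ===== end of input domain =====

-- B differs from A: one loop maintaining flags/counter instead of three all/any scans (same O(n) cost).

-- ===== PORT A =====
-- literal transliteration: three all/any scans plus two length tests, appending in order
def classify_config_py (sparse_list : List Int) : List String :=
  let classes : List String := []
  let classes := if sparse_list.all (fun x => x ≤ 200) then classes ++ ["sparse_all_leq_200"] else classes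
  let classes := if sparse_list.any (fun x => x ≥ 384) then classes ++ ["sparse_includes_384"] else classes
  let classes := if sparse_list.any (fun x => x ≥ 768) then classes ++ ["sparse_includes_768_plus"] else classes
  let classes := if sparse_list.length ≤ 3 then classes ++ ["sparse_3_or_fewer"] else classes
  let classes := if sparse_list.length ≥ 5 then classes ++ ["sparse_5_or_more"] else classes
  classes

-- ===== PORT B =====
-- single pass: fold accumulating (all_leq_200, any_384, any_768, n), then emit labels
def classify_config_py_alt (sparse_list : List Int) : List String :=
  let st := sparse_list.foldl
    (fun (s : Bool × Bool × Bool × Int) x =>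
      (s.1 && decide (x ≤ 200), s.2.1 || decide (x ≥ 384), s.2.2.1 || decide (x ≥ 768), s.2.2.2 + 1))
    (true, false, false, 0)
  let classes : List String := []
  let classes := if st.1 then classes ++ ["sparse_all_leq_200"] else classes
  let classes := if st.2.1 then classes ++ ["sparse_includes_384"] else classes
  let classes := if st.2.2.1 then classes ++ ["sparse_includes_768_plus"] else classes
  let classes := if st.2.2.2 ≤ 3 then classes ++ ["sparse_3_or_fewer"] else classes
  let classes := if st.2.2.2 ≥ 5 then classes ++ ["sparse_5_or_more"] else classes
  classes

-- ===== PRECONDITION & SPEC =====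
def Spec_classify_config_py (sparse_list : List Int) (out : List String) : Prop := out = classify_config_py_alt sparse_list
instance (sparse_list : List Int) (out : List String) : Decidable (Spec_classify_config_py sparse_list out) := by unfold Spec_classify_config_py; infer_instance

-- ===== CLAIM (what is proved, stated in full; the proofs are below) =====
def Claim_equal_classify_config_py : Prop := ∀ (sparse_list : List Int), Dom_classify_config_py sparse_list → Spec_classify_config_py sparse_list (classify_config_py sparse_list)

-- ===== LEMMAS AND PROOFS =====

theorem classify_fold_char (xs : List Int) (a b c : Bool) (n : Int) :
    xs.foldl
      (fun (s : Bool × Bool × Bool × Int) x =>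
        (s.1 && decide (x ≤ 200), s.2.1 || decide (x ≥ 384), s.2.2.1 || decide (x ≥ 768), s.2.2.2 + 1))
      (a, b, c, n)
    = (a && xs.all (fun x => decide (x ≤ 200)),
       b || xs.any (fun x => decide (x ≥ 384)),
       c || xs.any (fun x => decide (x ≥ 768)),
       n + xs.length) := by
  induction xs generalizing a b c n with
  | nil => simp
  | cons y ys ih =>
      simp only [List.foldl_cons, ih, List.all_cons, List.any_cons]
      refine Prod.ext ?_ (Prod.ext ?_ (Prod.ext ?_ ?_)) <;> simp [Bool.and_assoc, Bool.or_assoc]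
      omega

-- ===== VERDICT (by name: the statement is the Claim_ definition above) =====
theorem classify_config_py_spec : Claim_equal_classify_config_py := by
  intro xs _
  unfold Spec_classify_config_py classify_config_py classify_config_py_alt
  simp only [classify_fold_char, Bool.true_and, Bool.false_or]
  simp [ge_iff_le]
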